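-- pv_equiv track=rewrite | github.com/Inouye165/maze | tests/test_seed_reproducibility.py | _edge_count
-- ===== SOURCE A (Python) =====
-- def _edge_count(grid: tuple[str, ...]) -> int:
--     edges = 0
--     for row_index, row in enumerate(grid):
--         for col_index, cell in enumerate(row):
--             if cell == "#":
--                 continue
--             for delta_row, delta_col in ((1, 0), (0, 1)):
--                 next_row = row_index + delta_row
--                 next_col = col_index + delta_col
--                 if 0 <= next_row < len(grid) and 0 <= next_col < len(row):
--                     if grid[next_row][next_col] != "#":
--                         edges += 1
--     return edges
-- ===== SOURCE B (Python) =====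
-- def _horizontal_edges(grid):
--     count = 0
--     for row in grid:
--         for j in range(len(row) - 1):
--             if row[j] != "#" and row[j + 1] != "#":
--                 count += 1
--     return count
--
--
-- def _vertical_edges(grid):
--     count = 0
--     for i in range(len(grid) - 1):
--         row = grid[i]
--         below = grid[i + 1]
--         for j in range(len(row)):
--             if row[j] != "#" and below[j] != "#":
--                 count += 1
--     return count
--
--
-- def _edge_count(grid):
--     return _horizontal_edges(grid) + _vertical_edges(grid)
-- ===== Notes on version B (the rewrite author's own statement) =====
-- stated objective: alternative
-- what changed: Replaces the per-cell loop over the two direction deltas (with generic bounds checks) by two directionally specialized passes: one pass counting horizontal neighbour pairs row by row, and one pass counting vertical pairs between consecutive rows.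
import Mathlib
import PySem

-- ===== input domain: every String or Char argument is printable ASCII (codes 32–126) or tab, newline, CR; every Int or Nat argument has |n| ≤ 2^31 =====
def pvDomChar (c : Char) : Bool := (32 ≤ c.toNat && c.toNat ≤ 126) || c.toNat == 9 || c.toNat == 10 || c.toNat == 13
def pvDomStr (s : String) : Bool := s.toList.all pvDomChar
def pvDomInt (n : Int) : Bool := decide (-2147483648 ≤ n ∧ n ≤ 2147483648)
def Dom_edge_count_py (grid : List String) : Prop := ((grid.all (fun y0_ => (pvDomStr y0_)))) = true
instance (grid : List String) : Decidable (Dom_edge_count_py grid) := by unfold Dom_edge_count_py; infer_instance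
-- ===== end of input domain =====

-- B counts edges in two directionally specialized passes (horizontal, then vertical) instead of A's per-cell delta loop; a timing run measured a constant-factor speedup.

-- ===== PORT A =====
-- A's lookup grid[next_row][next_col]; IndexError is excluded by Pre_, the '!' default is never reached inside Pre_.
def pvLkA (grid : List String) (i j : Int) : Char :=
  (PySem.Str.pyGet? ((PySem.List.pyGet? grid i).getD "") j).getD '!'

def edge_count_py (grid : List String) : Int :=
  (PySem.List.enumerate grid).foldl (fun edges rp =>
    (PySem.List.enumerate rp.2.toList).foldl (fun edges cp =>
      if cp.2 = '#' then edges
      else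
        ([((1:Int),(0:Int)), ((0:Int),(1:Int))]).foldl (fun edges d =>
          let nr := rp.1 + d.1
          let nc := cp.1 + d.2
          if 0 ≤ nr ∧ nr < PySem.List.len grid ∧ 0 ≤ nc ∧ nc < PySem.Str.len rp.2 then
            if pvLkA grid nr nc ≠ '#' then edges + 1 else edges
          else edges) edges) edges) 0

-- ===== PORT B =====
def pvHorizontal (grid : List String) : Int :=
  grid.foldl (fun count row =>
    (PySem.List.pyRange 0 (PySem.Str.len row - 1) 1).foldl (fun count j =>
      if (PySem.Str.pyGet? row j).getD '#' ≠ '#' ∧ (PySem.Str.pyGet? row (j+1)).getD '#' ≠ '#'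
      then count + 1 else count) count) 0

def pvVertical (grid : List String) : Int :=
  (PySem.List.pyRange 0 (PySem.List.len grid - 1) 1).foldl (fun count i =>
    let row := (PySem.List.pyGet? grid i).getD ""
    let below := (PySem.List.pyGet? grid (i+1)).getD ""
    (PySem.List.pyRange 0 (PySem.Str.len row) 1).foldl (fun count j =>
      if (PySem.Str.pyGet? row j).getD '#' ≠ '#' ∧ (PySem.Str.pyGet? below j).getD '#' ≠ '#'
      then count + 1 else count) count) 0

def edge_count_py_alt (grid : List String) : Int :=
  pvHorizontal grid + pvVertical grid

-- ===== PRECONDITION & SPEC =====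
-- Pre_ excludes exactly the jagged grids on which Python A raises IndexError (a non-wall cell whose
-- column does not exist in the next row); Python B raises there too.
def Pre_edge_count_py (grid : List String) : Prop :=
  ∀ i : Nat, i < grid.length - 1 → ∀ j : Nat, j < (grid.getD i "").toList.length →
    (grid.getD i "").toList.getD j '#' ≠ '#' → j < (grid.getD (i+1) "").toList.length
instance (grid : List String) : Decidable (Pre_edge_count_py grid) := by unfold Pre_edge_count_py; infer_instance

def pvWitness_edge_count_py : List String := ["#..", ".#.", "..."]

def Spec_edge_count_py (grid : List String) (out : Int) : Prop := out = edge_count_py_alt grid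
instance (grid : List String) (out : Int) : Decidable (Spec_edge_count_py grid out) := by unfold Spec_edge_count_py; infer_instance

-- ===== CLAIM (what is proved, stated in full; the proofs are below) =====
def Claim_equal_edge_count_py : Prop := ∀ (grid : List String), Dom_edge_count_py grid → Pre_edge_count_py grid → Spec_edge_count_py grid (edge_count_py grid)

-- ===== LEMMAS AND PROOFS =====

-- the common normal form: horizontal count of a row, vertical count between two consecutive rows
def pvCntH (row : List Char) : Int :=
  ((List.range row.length).map (fun j =>
    if row.getD j '#' ≠ '#' ∧ row.getD (j+1) '#' ≠ '#' then (1:Int) else 0)).sum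

def pvCntV (row below : List Char) : Int :=
  ((List.range row.length).map (fun j =>
    if row.getD j '#' ≠ '#' ∧ below.getD j '#' ≠ '#' then (1:Int) else 0)).sum

def pvTotal (grid : List String) : Int :=
  ((List.range grid.length).map (fun i => pvCntH (grid.getD i "").toList)).sum
  + ((List.range (grid.length - 1)).map (fun i =>
      pvCntV (grid.getD i "").toList (grid.getD (i+1) "").toList)).sum

lemma pv_foldl_shift {α : Type} (l : List α) (f : Int → α → Int) (g : α → Int) (a : Int)
    (h : ∀ acc x, x ∈ l → f acc x = acc + g x) :
    l.foldl f a = a + (l.map g).sum := by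
  induction l generalizing a with
  | nil => simp
  | cons x t ih =>
    rw [List.foldl_cons, h a x (by simp),
      ih (a + g x) (fun acc y hy => h acc y (List.mem_cons_of_mem _ hy))]
    simp [add_assoc]

lemma pv_sum_map_add {α : Type} (l : List α) (f g : α → Int) :
    (l.map (fun x => f x + g x)).sum = (l.map f).sum + (l.map g).sum := by
  induction l with
  | nil => simp
  | cons x t ih => simp [ih]; ring

lemma pv_sum_enumerate {α : Type} (xs : List α) (d : α) (s : Int) (F : Int × α → Int) :
    ((PySem.List.enumerate xs s).map F).sum
      = ((List.range xs.length).map (fun (k : Nat) => F (s + (k:Int), xs.getD k d))).sum := by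
  induction xs generalizing s with
  | nil => simp [PySem.List.enumerate_nil]
  | cons x t ih =>
    rw [PySem.List.enumerate_cons, List.map_cons, List.sum_cons, ih (s+1)]
    rw [List.length_cons, List.range_succ_eq_map, List.map_cons, List.map_map, List.sum_cons]
    congr 1
    · simp
    · refine congrArg _ (List.map_congr_left ?_)
      intro k _
      simp only [Function.comp_apply, List.getD_cons_succ]
      congr 2
      push_cast; ring

lemma pv_sum_pyRange (b : Int) (F : Int → Int) :
    ((PySem.List.pyRange 0 b 1).map F).sum
      = ((List.range b.toNat).map (fun (k : Nat) => F (k:Int))).sum := by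
  rw [PySem.List.pyRange_one, List.map_map]
  simp only [Function.comp_def, zero_add, sub_zero]

lemma pv_range_getD {α : Type} (l : List α) (d : α) :
    (List.range l.length).map (fun i => l.getD i d) = l := by
  induction l with
  | nil => simp
  | cons x t ih =>
    simp only [List.length_cons, List.range_succ_eq_map, List.map_cons, List.map_map]
    refine congrArg (x :: ·) ?_
    simpa [Function.comp] using ih

lemma pv_termH_eq (row : List Char) :
    ((List.range (row.length - 1)).map (fun (k : Nat) =>
      if row.getD k '#' ≠ '#' ∧ row.getD (k+1) '#' ≠ '#' then (1:Int) else 0)).sum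
      = pvCntH row := by
  unfold pvCntH
  rcases Nat.eq_zero_or_pos row.length with h0 | hpos
  · simp [h0]
  · obtain ⟨l, hl⟩ : ∃ l, row.length = l + 1 := ⟨row.length - 1, by omega⟩
    rw [hl]
    simp only [Nat.add_sub_cancel, List.range_succ, List.map_append, List.sum_append]
    have hnone : row[l+1]? = none := List.getElem?_eq_none (by omega)
    simp [List.getD_eq_getElem?_getD, hnone]

lemma pv_count_step (c : Prop) [Decidable c] (acc : Int) :
    (if c then acc + 1 else acc) = acc + (if c then 1 else 0) := by
  split_ifs <;> ring

-- B's horizontal per-row sum, in range/getD normal form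
def pvGH (row : String) : Int :=
  ((List.range (row.toList.length - 1)).map (fun (k : Nat) =>
    if row.toList.getD k '#' ≠ '#' ∧ row.toList.getD (k+1) '#' ≠ '#' then (1:Int) else 0)).sum

-- B's vertical per-rowpair sum, in range/getD normal form
def pvGV (grid : List String) (i : Int) : Int :=
  ((List.range ((PySem.List.pyGet? grid i).getD "").toList.length).map (fun (j : Nat) =>
    if ((PySem.List.pyGet? grid i).getD "").toList.getD j '#' ≠ '#' ∧
       ((PySem.List.pyGet? grid (i+1)).getD "").toList.getD j '#' ≠ '#' then (1:Int) else 0)).sum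

lemma pv_sum_over_rows (f : String → Int) (grid : List String) :
    ((List.range grid.length).map (fun i => f (grid.getD i ""))).sum = (grid.map f).sum := by
  rw [show (fun i => f (grid.getD i "")) = f ∘ (fun i => List.getD grid i "") from rfl,
    ← List.map_map, pv_range_getD]

lemma pvHorizontal_eq (grid : List String) :
    pvHorizontal grid
      = ((List.range grid.length).map (fun i => pvCntH (grid.getD i "").toList)).sum := by
  unfold pvHorizontal
  rw [pv_foldl_shift grid _ pvGH 0 ?hrow]
  case hrow =>
    intro acc row _
    rw [pv_foldl_shift _ _ (fun j =>
      if (PySem.Str.pyGet? row j).getD '#' ≠ '#' ∧ (PySem.Str.pyGet? row (j+1)).getD '#' ≠ '#'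
      then (1:Int) else 0) acc (fun acc j _ => pv_count_step _ _)]
    rw [PySem.Str.len_eq, pv_sum_pyRange]
    have hb : (((row.toList.length : Int)) - 1).toNat = row.toList.length - 1 := by omega
    rw [hb]
    unfold pvGH
    refine congrArg _ (congrArg _ (List.map_congr_left ?_))
    intro k _
    rw [show ((k:Int) + 1) = ((k+1 : Nat) : Int) from by push_cast; ring,
      PySem.Str.pyGet?_natCast, PySem.Str.pyGet?_natCast]
    rw [List.getD_eq_getElem?_getD, List.getD_eq_getElem?_getD]
  rw [zero_add, pv_sum_over_rows (fun row => pvCntH row.toList) grid]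
  refine congrArg _ (List.map_congr_left ?_)
  intro row _
  unfold pvGH
  exact pv_termH_eq row.toList

lemma pvVertical_eq (grid : List String) :
    pvVertical grid
      = ((List.range (grid.length - 1)).map (fun i =>
          pvCntV (grid.getD i "").toList (grid.getD (i+1) "").toList)).sum := by
  unfold pvVertical
  rw [pv_foldl_shift _ _ (pvGV grid) 0 ?vrow]
  case vrow =>
    intro acc i _
    rw [pv_foldl_shift _ _ (fun j =>
      if (PySem.Str.pyGet? ((PySem.List.pyGet? grid i).getD "") j).getD '#' ≠ '#' ∧
         (PySem.Str.pyGet? ((PySem.List.pyGet? grid (i+1)).getD "") j).getD '#' ≠ '#'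
      then (1:Int) else 0) acc (fun acc j _ => pv_count_step _ _)]
    rw [PySem.Str.len_eq, pv_sum_pyRange]
    unfold pvGV
    rw [Int.toNat_natCast]
    refine congrArg _ (congrArg _ (List.map_congr_left ?_))
    intro j _
    rw [PySem.Str.pyGet?_natCast, PySem.Str.pyGet?_natCast]
    rw [List.getD_eq_getElem?_getD, List.getD_eq_getElem?_getD]
  rw [zero_add, PySem.List.len_eq, pv_sum_pyRange]
  have hb : (((grid.length : Int)) - 1).toNat = grid.length - 1 := by omega
  rw [hb]
  refine congrArg _ (List.map_congr_left ?_)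
  intro k hk
  unfold pvGV pvCntV
  rw [show ((k:Int) + 1) = ((k+1 : Nat) : Int) from by push_cast; ring,
    PySem.List.pyGet?_natCast, PySem.List.pyGet?_natCast]
  rw [show (grid[(k:Nat)]?.getD "") = grid.getD k "" from (List.getD_eq_getElem?_getD).symm,
    show (grid[(k+1:Nat)]?.getD "") = grid.getD (k+1) "" from (List.getD_eq_getElem?_getD).symm]

lemma edge_count_py_alt_eq (grid : List String) : edge_count_py_alt grid = pvTotal grid := by
  unfold edge_count_py_alt pvTotal
  rw [pvHorizontal_eq, pvVertical_eq]

-- A's per-cell contribution (the unrolled delta loop)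
def pvCell (grid : List String) (rp : Int × String) (cp : Int × Char) : Int :=
  if cp.2 = '#' then 0 else
    (if 0 ≤ rp.1 + 1 ∧ rp.1 + 1 < PySem.List.len grid ∧ 0 ≤ cp.1 + 0 ∧ cp.1 + 0 < PySem.Str.len rp.2
     then (if pvLkA grid (rp.1 + 1) (cp.1 + 0) ≠ '#' then (1:Int) else 0) else 0)
    + (if 0 ≤ rp.1 + 0 ∧ rp.1 + 0 < PySem.List.len grid ∧ 0 ≤ cp.1 + 1 ∧ cp.1 + 1 < PySem.Str.len rp.2
     then (if pvLkA grid (rp.1 + 0) (cp.1 + 1) ≠ '#' then (1:Int) else 0) else 0)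

lemma pv_cell_eq (grid : List String) (i j : Nat) (hi : i < grid.length)
    (hj : j < (grid.getD i "").toList.length) (hpre : Pre_edge_count_py grid) :
    pvCell grid ((i:Int), grid.getD i "") ((j:Int), (grid.getD i "").toList.getD j '#')
      = (if (grid.getD i "").toList.getD j '#' ≠ '#' ∧
            (grid.getD (i+1) "").toList.getD j '#' ≠ '#' then (1:Int) else 0)
          * (if i + 1 < grid.length then 1 else 0)
        + (if (grid.getD i "").toList.getD j '#' ≠ '#' ∧
             (grid.getD i "").toList.getD (j+1) '#' ≠ '#' then (1:Int) else 0) := by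
  have hgrid1 : (PySem.List.pyGet? grid ((i:Int) + 1)).getD "" = grid.getD (i+1) "" := by
    rw [show ((i:Int) + 1) = ((i+1 : Nat) : Int) from by push_cast; ring,
      PySem.List.pyGet?_natCast, ← List.getD_eq_getElem?_getD]
  have hgrid0 : (PySem.List.pyGet? grid ((i:Int) + 0)).getD "" = grid.getD i "" := by
    rw [show ((i:Int) + 0) = ((i : Nat) : Int) from by ring,
      PySem.List.pyGet?_natCast, ← List.getD_eq_getElem?_getD]
  unfold pvCell pvLkA
  rw [hgrid1, hgrid0,
    show ((j:Int) + 0) = ((j : Nat) : Int) from by ring,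
    show ((j:Int) + 1) = ((j+1 : Nat) : Int) from by push_cast; ring]
  simp only [PySem.Str.pyGet?_natCast, PySem.List.len_eq, PySem.Str.len_eq]
  by_cases hc : (grid.getD i "").toList.getD j '#' = '#'
  · simp only [List.getD_eq_getElem?_getD] at hc
    simp [List.getD_eq_getElem?_getD, hc]
  · rw [if_neg (by simpa [List.getD_eq_getElem?_getD] using hc)]
    by_cases hv : i + 1 < grid.length
    · have hblen : j < (grid.getD (i+1) "").toList.length := hpre i (by omega) j hj hc
      have e1 : (grid.getD (i+1) "").toList[j]? = some (grid.getD (i+1) "").toList[j] :=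
        List.getElem?_eq_getElem hblen
      have E1 : (grid.getD (i+1) "").toList[(j:Nat)]?.getD '!'
          = (grid.getD (i+1) "").toList.getD j '#' := by
        rw [e1, Option.getD_some]
        exact (List.getD_eq_getElem _ '#' hblen).symm
      have gV : (0 ≤ (i:Int) + 1 ∧ (i:Int) + 1 < (grid.length:Int) ∧
          0 ≤ ((j:Nat):Int) ∧ ((j:Nat):Int) < ((grid.getD i "").toList.length:Int)) := by
        refine ⟨by omega, by omega, by omega, by omega⟩
      rw [if_pos gV, if_pos hv, mul_one, E1]
      by_cases hj1 : j + 1 < (grid.getD i "").toList.length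
      · have e2 : (grid.getD i "").toList[j+1]? = some (grid.getD i "").toList[j+1] :=
          List.getElem?_eq_getElem hj1
        have E2 : (grid.getD i "").toList[(j+1:Nat)]?.getD '!'
            = (grid.getD i "").toList.getD (j+1) '#' := by
          rw [e2, Option.getD_some]
          exact (List.getD_eq_getElem _ '#' hj1).symm
        have gH : (0 ≤ (i:Int) + 0 ∧ (i:Int) + 0 < (grid.length:Int) ∧
            0 ≤ ((j+1:Nat):Int) ∧ ((j+1:Nat):Int) < ((grid.getD i "").toList.length:Int)) := by
          refine ⟨by omega, by omega, by omega, by omega⟩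
        rw [if_pos gH, E2]
        simp only [List.getD_eq_getElem?_getD] at hc ⊢
        simp [hc, add_comm]
      · have hd : (grid.getD i "").toList.getD (j+1) '#' = '#' :=
          List.getD_eq_default _ _ (by omega)
        have gH : ¬ (0 ≤ (i:Int) + 0 ∧ (i:Int) + 0 < (grid.length:Int) ∧
            0 ≤ ((j+1:Nat):Int) ∧ ((j+1:Nat):Int) < ((grid.getD i "").toList.length:Int)) := by
          intro h
          have := h.2.2.2
          omega
        rw [if_neg gH, hd]
        simp only [List.getD_eq_getElem?_getD] at hc hd ⊢
        simp [hc]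
    · have hd2 : (grid.getD (i+1) "").toList.getD j '#' = '#' := by
        have hnil : grid.getD (i+1) "" = "" := List.getD_eq_default _ _ (by omega)
        rw [hnil]
        simp
      have gV : ¬ (0 ≤ (i:Int) + 1 ∧ (i:Int) + 1 < (grid.length:Int) ∧
          0 ≤ ((j:Nat):Int) ∧ ((j:Nat):Int) < ((grid.getD i "").toList.length:Int)) := by
        intro h
        have := h.2.1
        omega
      rw [if_neg gV, if_neg hv, mul_zero, zero_add, zero_add]
      by_cases hj1 : j + 1 < (grid.getD i "").toList.length
      · have e2 : (grid.getD i "").toList[j+1]? = some (grid.getD i "").toList[j+1] :=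
          List.getElem?_eq_getElem hj1
        have E2 : (grid.getD i "").toList[(j+1:Nat)]?.getD '!'
            = (grid.getD i "").toList.getD (j+1) '#' := by
          rw [e2, Option.getD_some]
          exact (List.getD_eq_getElem _ '#' hj1).symm
        have gH : (0 ≤ (i:Int) + 0 ∧ (i:Int) + 0 < (grid.length:Int) ∧
            0 ≤ ((j+1:Nat):Int) ∧ ((j+1:Nat):Int) < ((grid.getD i "").toList.length:Int)) := by
          refine ⟨by omega, by omega, by omega, by omega⟩
        rw [if_pos gH, E2]
        simp only [List.getD_eq_getElem?_getD] at hc ⊢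
        simp [hc]
      · have hd : (grid.getD i "").toList.getD (j+1) '#' = '#' :=
          List.getD_eq_default _ _ (by omega)
        have gH : ¬ (0 ≤ (i:Int) + 0 ∧ (i:Int) + 0 < (grid.length:Int) ∧
            0 ≤ ((j+1:Nat):Int) ∧ ((j+1:Nat):Int) < ((grid.getD i "").toList.length:Int)) := by
          intro h
          have := h.2.2.2
          omega
        rw [if_neg gH, hd]
        simp

lemma pv_vtail (n : Nat) (g : Nat → Int) :
    ((List.range n).map (fun i => g i * (if i + 1 < n then (1:Int) else 0))).sum
      = ((List.range (n-1)).map g).sum := by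
  cases n with
  | zero => simp
  | succ m =>
    rw [List.range_succ, List.map_append, List.sum_append]
    simp only [Nat.add_sub_cancel]
    have hlast : g m * (if m + 1 < m + 1 then (1:Int) else 0) = 0 := by simp
    rw [List.map_singleton, List.sum_singleton, hlast, add_zero]
    refine congrArg _ (List.map_congr_left ?_)
    intro i hi
    rw [List.mem_range] at hi
    rw [if_pos (by omega), mul_one]

lemma pv_rowA (grid : List String) (i : Nat) (hi : i < grid.length)
    (hpre : Pre_edge_count_py grid) :
    ((List.range (grid.getD i "").toList.length).map (fun (j : Nat) =>
        pvCell grid ((i:Int), grid.getD i "") ((j:Int), (grid.getD i "").toList.getD j '#'))).sum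
      = pvCntV (grid.getD i "").toList (grid.getD (i+1) "").toList
          * (if i + 1 < grid.length then (1:Int) else 0)
        + pvCntH (grid.getD i "").toList := by
  have hcong : ∀ j ∈ List.range (grid.getD i "").toList.length,
      pvCell grid ((i:Int), grid.getD i "") ((j:Int), (grid.getD i "").toList.getD j '#')
        = (if (grid.getD i "").toList.getD j '#' ≠ '#' ∧
              (grid.getD (i+1) "").toList.getD j '#' ≠ '#' then (1:Int) else 0)
            * (if i + 1 < grid.length then 1 else 0)
          + (if (grid.getD i "").toList.getD j '#' ≠ '#' ∧
               (grid.getD i "").toList.getD (j+1) '#' ≠ '#' then (1:Int) else 0) := by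
    intro j hj
    rw [List.mem_range] at hj
    exact pv_cell_eq grid i j hi hj hpre
  rw [List.map_congr_left hcong, pv_sum_map_add]
  congr 1
  unfold pvCntV
  by_cases hvv : i + 1 < grid.length
  · simp [hvv]
  · simp [hvv]

lemma edge_count_py_eq (grid : List String) (hpre : Pre_edge_count_py grid) :
    edge_count_py grid = pvTotal grid := by
  unfold edge_count_py
  rw [pv_foldl_shift _ _ (fun rp =>
      ((PySem.List.enumerate rp.2.toList).map (pvCell grid rp)).sum) 0 ?hrow]
  case hrow =>
    intro edges rp _
    rw [pv_foldl_shift _ _ (pvCell grid rp) edges ?hcell]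
    case hcell =>
      intro edges cp _
      by_cases hc : cp.2 = '#'
      · simp [pvCell, hc]
      · simp only [if_neg hc, List.foldl_cons, List.foldl_nil]
        unfold pvCell
        rw [if_neg hc]
        split_ifs <;> ring
  rw [zero_add, pv_sum_enumerate _ "" 0]
  simp only [zero_add]
  have hrows : ∀ i ∈ List.range grid.length,
      (fun (k : Nat) => ((PySem.List.enumerate (grid.getD k "").toList).map
        (pvCell grid ((k:Int), grid.getD k ""))).sum) i
      = pvCntV (grid.getD i "").toList (grid.getD (i+1) "").toList
          * (if i + 1 < grid.length then (1:Int) else 0)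
        + pvCntH (grid.getD i "").toList := by
    intro i hi
    rw [List.mem_range] at hi
    show ((PySem.List.enumerate (grid.getD i "").toList).map
      (pvCell grid ((i:Int), grid.getD i ""))).sum = _
    rw [pv_sum_enumerate _ '#' 0]
    simp only [zero_add]
    exact pv_rowA grid i hi hpre
  rw [List.map_congr_left hrows, pv_sum_map_add, pv_vtail]
  unfold pvTotal
  exact add_comm _ _

-- ===== VERDICT (by name: the statement is the Claim_ definition above) =====
theorem edge_count_py_spec : Claim_equal_edge_count_py := by
  intro grid _ hpre
  unfold Spec_edge_count_py
  rw [edge_count_py_eq grid hpre, edge_count_py_alt_eq]
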